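-- pv_equiv track=rewrite | github.com/z3y50n/advent_of_code | 2020/21/day21.py | count_bad
-- ===== SOURCE A (Python) =====
-- def count_bad(ingredients, foods):
--     good = {ingr for alrg in ingredients.values() for ingr in alrg}
--     cnt = 0
--     for recipe in foods:
--         for ingr in recipe:
--             if ingr not in good:
--                 cnt += 1
--     return cnt
-- ===== SOURCE B (Python) =====
-- def count_bad(ingredients, foods):
--     occurrences = [ingr for recipe in foods for ingr in recipe]
--     counts = {}
--     for ingr in occurrences:
--         counts[ingr] = counts.get(ingr, 0) + 1
--     good = {ingr for alrg in ingredients.values() for ingr in alrg}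
--     return sum(c for ingr, c in counts.items() if ingr not in good)
-- ===== Notes on version B (the rewrite author's own statement) =====
-- stated objective: alternative
-- what changed: B first builds a frequency table of all ingredient occurrences, then sums the counts of the table's distinct keys that are not in the allergen set, instead of A's per-occurrence incrementing scan.
import Mathlib
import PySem

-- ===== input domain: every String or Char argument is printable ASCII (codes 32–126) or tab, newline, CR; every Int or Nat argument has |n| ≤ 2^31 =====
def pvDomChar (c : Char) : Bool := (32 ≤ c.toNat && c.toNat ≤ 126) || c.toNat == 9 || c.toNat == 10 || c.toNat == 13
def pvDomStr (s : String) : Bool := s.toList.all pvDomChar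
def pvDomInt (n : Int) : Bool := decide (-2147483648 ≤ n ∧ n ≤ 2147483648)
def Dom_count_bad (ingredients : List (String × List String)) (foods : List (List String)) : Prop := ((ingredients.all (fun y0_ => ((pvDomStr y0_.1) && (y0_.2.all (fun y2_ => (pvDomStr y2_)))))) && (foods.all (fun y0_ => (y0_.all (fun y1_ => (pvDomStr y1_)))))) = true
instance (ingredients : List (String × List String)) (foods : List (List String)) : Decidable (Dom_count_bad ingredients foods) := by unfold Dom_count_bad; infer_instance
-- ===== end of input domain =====

-- B builds a frequency table of all occurrences first and sums the counts of its
-- distinct keys outside the allergen set, instead of A's per-occurrence scan (alternative).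

-- ===== PORT A =====
def count_bad (ingredients : List (String × List String)) (foods : List (List String)) : Int :=
  let good : PySem.Set String := PySem.Set.ofList (ingredients.flatMap (·.2))
  foods.foldl (fun cnt recipe =>
    recipe.foldl (fun cnt ingr =>
      if !(PySem.Set.contains good ingr) then cnt + 1 else cnt) cnt) 0

-- ===== PORT B =====
def count_bad_alt (ingredients : List (String × List String)) (foods : List (List String)) : Int :=
  let occurrences : List String := foods.flatMap (fun recipe => recipe)
  let counts : PySem.Dict String Int :=
    occurrences.foldl (fun d ingr => d.insert ingr (d.getD ingr 0 + 1)) PySem.Dict.empty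
  let good : PySem.Set String := PySem.Set.ofList (ingredients.flatMap (·.2))
  (counts.items.filter (fun p => !(PySem.Set.contains good p.1))).foldl
    (fun acc p => acc + p.2) 0

-- ===== PRECONDITION & SPEC =====
def Spec_count_bad (ingredients : List (String × List String)) (foods : List (List String)) (out : Int) : Prop := out = count_bad_alt ingredients foods
instance (ingredients : List (String × List String)) (foods : List (List String)) (out : Int) : Decidable (Spec_count_bad ingredients foods out) := by unfold Spec_count_bad; infer_instance

-- ===== CLAIM (what is proved, stated in full; the proofs are below) =====
def Claim_equal_count_bad : Prop := ∀ (ingredients : List (String × List String)) (foods : List (List String)), Dom_count_bad ingredients foods → Spec_count_bad ingredients foods (count_bad ingredients foods)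

-- ===== LEMMAS AND PROOFS =====

-- sum over a nodup key list of per-key counts of xs, restricted by p, = countP p xs
theorem sum_counts_filter {α : Type} [DecidableEq α] (ks : List α) (hnd : ks.Nodup)
    (p : α → Bool) (xs : List α) (hmem : ∀ y ∈ xs, y ∈ ks) :
    (((ks.filter p).map (fun k => (xs.count k : Int))).sum) = (xs.countP p : Int) := by
  induction xs with
  | nil => simp
  | cons x xs ih =>
    have hx : x ∈ ks := hmem x (by simp)
    have ih' := ih (fun y hy => hmem y (by simp [hy]))
    have hsplit : ((ks.filter p).map (fun k => (((x :: xs).count k : Nat) : Int))).sum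
        = ((ks.filter p).map (fun k => (xs.count k : Int))).sum
          + ((ks.filter p).map (fun k => if x = k then (1 : Int) else 0)).sum := by
      rw [← List.sum_map_add]
      apply congrArg
      apply List.map_congr_left
      intro k _
      by_cases h : x = k <;> simp [h]
    have hind : ((ks.filter p).map (fun k => if x = k then (1 : Int) else 0)).sum
        = if p x then (1 : Int) else 0 := by
      have hcount : ((ks.filter p).map (fun k => if x = k then (1 : Int) else 0)).sum
          = ((ks.filter p).count x : Int) := by
        induction ks.filter p with
        | nil => simp
        | cons a l ihl =>
          by_cases h : x = a
          · subst h
            simp only [List.map_cons, List.sum_cons, List.count_cons_self, ihl]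
            push_cast; ring
          · simp only [List.map_cons, List.sum_cons, if_neg h, ihl,
              List.count_cons_of_ne (fun hc => h hc.symm)]
            ring
      have h1 : ks.count x = 1 := List.count_eq_one_of_mem hnd hx
      by_cases hp : p x
      · rw [hcount, List.count_filter hp, h1]; simp [hp]
      · have h0 : (ks.filter p).count x = 0 :=
          List.count_eq_zero.2 (fun hc => hp (List.of_mem_filter hc))
        rw [hcount, h0]; simp [hp]
    rw [hsplit, ih', hind]
    by_cases hp : p x <;> simp [hp]
  
theorem count_bad_eq_countP (good : PySem.Set String) (foods : List (List String)) (a : Int) :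
    foods.foldl (fun cnt recipe =>
      recipe.foldl (fun cnt ingr =>
        if !(PySem.Set.contains good ingr) then cnt + 1 else cnt) cnt) a
    = a + ((foods.flatMap (fun r => r)).countP (fun i => !(PySem.Set.contains good i)) : Int) := by
  induction foods generalizing a with
  | nil => simp
  | cons r rs ih =>
    simp only [List.foldl_cons, List.flatMap_cons, List.countP_append]
    rw [PySem.List.foldl_if_add_one, ih]
    push_cast
    ring

-- ===== VERDICT (by name: the statement is the Claim_ definition above) =====
theorem count_bad_spec : Claim_equal_count_bad := by
  intro ingredients foods _
  unfold Spec_count_bad count_bad count_bad_alt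
  simp only []
  set good := PySem.Set.ofList (ingredients.flatMap (·.2)) with hg
  set xs := foods.flatMap (fun r => r) with hxs
  rw [count_bad_eq_countP good foods 0]
  rw [PySem.Dict.foldl_insert_getD_add_one_eq_counter]
  rw [PySem.Dict.items_counter]
  rw [List.filter_map]
  simp only [Function.comp_def]
  rw [PySem.List.foldl_add (g := fun (p : String × Int) => p.2)]
  simp only [List.map_map, Function.comp_def]
  rw [zero_add, zero_add]
  exact (sum_counts_filter (PySem.Set.ofList xs) (PySem.Set.nodup_ofList xs)
    (fun i => !(PySem.Set.contains good i)) xs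
    (fun y hy => (PySem.Set.mem_ofList xs y).2 hy)).symm
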